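-- pv_equiv track=rewrite | github.com/ErosRata/Programacion-Basica-ENE-JUN-25 | ubicador vocales.py | ubicadorDeVocales
-- ===== SOURCE A (Python) =====
-- def ubicadorDeVocales(palabra):
--     ubicacion = {}
--     vocales = "aeiouáéíóú"
--     for indice, i in enumerate(palabra.lower()):
--         if i in vocales:
--             if i in ubicacion:
--                 ubicacion[i].append(indice)
--             else:
--                 ubicacion[i] = [indice]
--     return ubicacion
-- ===== SOURCE B (Python) =====
-- def ubicadorDeVocales(palabra):
--     minuscula = palabra.lower()
--     vocales = "aeiouáéíóú"
--     orden = []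
--     for c in minuscula:
--         if c in vocales and c not in orden:
--             orden.append(c)
--     return {v: [i for i, c in enumerate(minuscula) if c == v] for v in orden}
-- ===== Notes on version B (the rewrite author's own statement) =====
-- stated objective: alternative
-- what changed: A builds the dict in one accumulating pass over enumerate(word.lower()), appending to per-vowel lists as it goes; B first collects the occurring vowels in first-appearance order and then gathers each vowel's positions with its own scan of the word (a key-driven two-phase decomposition).
import Mathlib
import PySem

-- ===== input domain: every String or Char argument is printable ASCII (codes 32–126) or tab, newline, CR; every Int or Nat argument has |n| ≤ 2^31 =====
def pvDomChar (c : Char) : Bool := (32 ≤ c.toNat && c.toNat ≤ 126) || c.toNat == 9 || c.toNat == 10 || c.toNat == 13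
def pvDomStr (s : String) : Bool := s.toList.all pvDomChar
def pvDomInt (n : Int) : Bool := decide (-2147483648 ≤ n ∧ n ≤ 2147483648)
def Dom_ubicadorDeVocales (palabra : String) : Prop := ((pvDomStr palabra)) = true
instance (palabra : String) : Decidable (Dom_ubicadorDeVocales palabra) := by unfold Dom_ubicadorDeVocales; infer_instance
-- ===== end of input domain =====

-- B replaces A's single accumulating dict pass by a two-phase decomposition (collect the
-- vowels in first-occurrence order, then scan the word once per occurring vowel); same
-- return value, alternative structure (not claimed faster).

-- ===== PORT A =====
-- literal port of A: one pass over enumerate(palabra.lower()), growing/updating a dict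
def ubicadorDeVocales (palabra : String) : List (String × List Int) :=
  ((PySem.List.enumerate (PySem.Str.lower palabra).toList 0).foldl
    (fun (ub : PySem.Dict String (List Int)) p =>
      if ("aeiouáéíóú".toList.contains p.2) then          -- if i in vocales
        if ub.contains (String.ofList [p.2]) then          -- if i in ubicacion
          ub.modify (String.ofList [p.2]) [] (fun l => l ++ [p.1])   -- ubicacion[i].append(indice)
        else ub.insert (String.ofList [p.2]) [p.1]         -- ubicacion[i] = [indice]
      else ub)
    PySem.Dict.empty).items

-- ===== PORT B =====
-- literal port of Source B: first loop collects `orden` (occurring vowels, first-occurrence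
-- order), then a dict comprehension over `orden`; its keys are fresh and distinct, so the
-- comprehension is the fold of inserts below.
def ubicadorDeVocales_alt (palabra : String) : List (String × List Int) :=
  let minuscula := (PySem.Str.lower palabra).toList
  let orden := minuscula.foldl
    (fun acc c => if ("aeiouáéíóú".toList.contains c && !acc.contains c) then acc ++ [c] else acc) []
  (orden.foldl
    (fun (d : PySem.Dict String (List Int)) v =>
      d.insert (String.ofList [v])
        (((PySem.List.enumerate minuscula 0).filter (fun p => p.2 == v)).map (fun p => p.1)))
    PySem.Dict.empty).items

-- ===== PRECONDITION & SPEC =====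
def Spec_ubicadorDeVocales (palabra : String) (out : List (String × List Int)) : Prop := out = ubicadorDeVocales_alt palabra
instance (palabra : String) (out : List (String × List Int)) : Decidable (Spec_ubicadorDeVocales palabra out) := by unfold Spec_ubicadorDeVocales; infer_instance

-- ===== CLAIM (what is proved, stated in full; the proofs are below) =====
def Claim_equal_ubicadorDeVocales : Prop := ∀ (palabra : String), Dom_ubicadorDeVocales palabra → Spec_ubicadorDeVocales palabra (ubicadorDeVocales palabra)

-- ===== LEMMAS AND PROOFS =====

-- the 1-char-string key constructor is injective
theorem pvKeyInj : Function.Injective (fun c => String.ofList [c]) := by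
  intro a b h
  have := congrArg String.toList h
  simpa using this

theorem pvModifyAbsent (d : PySem.Dict String (List Int)) (k : String) (x : Int)
    (h : d.contains k = false) : d.modify k [] (fun l => l ++ [x]) = d.insert k [x] := by
  simp [PySem.Dict.modify, PySem.Dict.getD_of_not_contains d [] h]

-- Set.ofList commutes with mapping the injective key constructor
theorem pvOfListMap (xs acc : List Char) :
    (xs.map (fun c => String.ofList [c])).foldl PySem.Set.add (acc.map (fun c => String.ofList [c]))
      = (xs.foldl PySem.Set.add acc).map (fun c => String.ofList [c]) := by
  induction xs generalizing acc with
  | nil => rfl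
  | cons c xs ih =>
    simp only [List.map_cons, List.foldl_cons]
    rw [show PySem.Set.add (acc.map (fun c => String.ofList [c])) (String.ofList [c])
          = (PySem.Set.add acc c).map (fun c => String.ofList [c]) from by
        by_cases hm : c ∈ acc <;>
          simp [PySem.Set.add, PySem.Set.contains, List.mem_map_of_injective pvKeyInj, hm]]
    exact ih _

theorem pvMain (cs : List Char) :
    ((PySem.List.enumerate cs 0).foldl
      (fun (ub : PySem.Dict String (List Int)) p =>
        if ("aeiouáéíóú".toList.contains p.2) then
          if ub.contains (String.ofList [p.2]) then
            ub.modify (String.ofList [p.2]) [] (fun l => l ++ [p.1])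
          else ub.insert (String.ofList [p.2]) [p.1]
        else ub)
      PySem.Dict.empty).items
    = ((cs.foldl (fun acc c => if ("aeiouáéíóú".toList.contains c && !acc.contains c) then acc ++ [c] else acc) []).foldl
        (fun (d : PySem.Dict String (List Int)) v =>
          d.insert (String.ofList [v])
            (((PySem.List.enumerate cs 0).filter (fun p => p.2 == v)).map (fun p => p.1)))
        PySem.Dict.empty).items := by
  -- abbreviations
  set V : List Char := "aeiouáéíóú".toList with hV
  set f : Char → String := fun c => String.ofList [c] with hf
  set en : List (Int × Char) := PySem.List.enumerate cs 0 with hen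
  set l' : List (String × Int) :=
    (en.filter (fun p => V.contains p.2)).map (fun p => (f p.2, p.1)) with hl'
  set orden : List Char := cs.foldl
    (fun acc c => if (V.contains c && !acc.contains c) then acc ++ [c] else acc) [] with horden0
  -- A's fold equals a modify-fold over the vowel entries l'
  have hA : en.foldl
      (fun (ub : PySem.Dict String (List Int)) p =>
        if V.contains p.2 then
          if ub.contains (f p.2) then ub.modify (f p.2) [] (fun l => l ++ [p.1])
          else ub.insert (f p.2) [p.1]
        else ub) PySem.Dict.empty
      = l'.foldl (fun d q => d.modify q.1 [] (fun l => l ++ [q.2])) PySem.Dict.empty := by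
    rw [hl', List.foldl_map, List.foldl_filter]
    have hfun : (fun (ub : PySem.Dict String (List Int)) p =>
        if V.contains p.2 then
          if ub.contains (f p.2) then ub.modify (f p.2) [] (fun l => l ++ [p.1])
          else ub.insert (f p.2) [p.1]
        else ub)
      = (fun (d : PySem.Dict String (List Int)) (p : Int × Char) =>
          if V.contains p.2 then d.modify (f p.2) [] (fun l => l ++ [p.1]) else d) := by
      funext d p
      by_cases hv : V.contains p.2
      · by_cases hk : d.contains (f p.2)
        · simp [hk]
        · simp only [hv, if_true, hk, if_false, Bool.false_eq_true]
          exact (pvModifyAbsent d _ p.1 (by simpa using hk)).symm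
      · have hv' : p.2 ∉ V := by simpa using hv
        simp [hv']
    rw [hfun]
  set dA := l'.foldl (fun d q => d.modify q.1 [] (fun l => l ++ [q.2])) PySem.Dict.empty with hdA
  have hnodup : dA.keys.Nodup := by
    have := PySem.Dict.nodup_keys_foldl_modify_key l' (fun q => q.1) []
      (fun _ q => fun l => l ++ [q.2]) PySem.Dict.empty (by simp)
    simpa using this
  have hkeys : dA.keys = PySem.Set.ofList (l'.map (fun q => q.1)) := by
    have := PySem.Dict.keys_foldl_modify_key l' (fun q => q.1) []
      (fun _ q => fun l => l ++ [q.2]) PySem.Dict.empty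
    simpa [PySem.Dict.keys_empty, PySem.Set.update_nil_left] using this
  have hval : ∀ k, dA.getD k [] = (l'.filter (fun q => q.1 == k)).map (fun q => q.2) := by
    intro k
    have := PySem.Dict.getD_foldl_modify_append l' PySem.Dict.empty k
    simpa using this
  -- B's first loop builds set(vowels of cs) in first-occurrence order
  have hordE : orden = PySem.Set.ofList (cs.filter (fun c => V.contains c)) := by
    rw [PySem.Set.ofList_eq_foldl, List.foldl_filter, horden0]
    have : (fun (acc : List Char) c => if (V.contains c && !acc.contains c) then acc ++ [c] else acc)
        = (fun (acc : List Char) c => if V.contains c then PySem.Set.add acc c else acc) := by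
      funext acc c
      by_cases h1 : V.contains c <;> by_cases h2 : acc.contains c <;>
        simp_all [PySem.Set.add, PySem.Set.contains]
    rw [this]
  have hordNodup : orden.Nodup := by rw [hordE]; exact PySem.Set.nodup_ofList _
  have hordMem : ∀ v ∈ orden, V.contains v = true := by
    intro v hv
    rw [hordE] at hv
    have hm : v ∈ cs.filter (fun c => V.contains c) := (PySem.List.mem_dedup _ _).mp hv
    exact (List.mem_filter.mp hm).2
  -- keys of A = orden mapped through the key constructor
  have hlmap : l'.map (fun q => q.1) = (cs.filter (fun c => V.contains c)).map f := by
    conv_rhs => rw [← PySem.List.map_snd_enumerate cs 0, List.filter_map, List.map_map]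
    rw [hl', List.map_map]
    rfl
  have hkeys2 : dA.keys = orden.map f := by
    rw [hkeys, hlmap, hordE, PySem.Set.ofList_eq_foldl, PySem.Set.ofList_eq_foldl]
    simpa using pvOfListMap (cs.filter (fun c => V.contains c)) []
  -- B's dict comprehension: fresh distinct keys, items append in order
  have hB : ((orden.foldl
      (fun (d : PySem.Dict String (List Int)) v =>
        d.insert (f v) ((en.filter (fun p => p.2 == v)).map (fun p => p.1)))
      PySem.Dict.empty).items : List (String × List Int))
      = orden.map (fun v => (f v, (en.filter (fun p => p.2 == v)).map (fun p => p.1))) := by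
    have := PySem.Dict.items_foldl_insert_fresh orden (fun v => f v)
      (fun v => (en.filter (fun p => p.2 == v)).map (fun p => p.1)) PySem.Dict.empty
      (fun a _ => by simp) (List.Nodup.map pvKeyInj hordNodup)
    simpa using this
  -- per-key values agree
  have hperkey : ∀ v ∈ orden,
      dA.getD (f v) [] = (en.filter (fun p => p.2 == v)).map (fun p => p.1) := by
    intro v hv
    have hvV : V.contains v = true := hordMem v hv
    rw [hval, hl', List.filter_map, List.map_map]
    simp only [Function.comp_def, List.filter_filter]
    have hfe : en.filter (fun p => ((f p.2, p.1).1 == f v && V.contains p.2))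
        = en.filter (fun p => p.2 == v) := by
      apply List.filter_congr
      intro p _
      by_cases hc : p.2 = v
      · have hvV' : v ∈ V := by simpa using hvV
        simp [hc, hvV']
      · have hne : (f p.2 == f v) = false := by
          simpa using fun h => hc (pvKeyInj h)
        simp [hc, hne]
    rw [hfe]
  -- assemble
  rw [hA, PySem.Dict.items_eq_map_keys dA hnodup [], hkeys2, List.map_map, hB]
  apply List.map_congr_left
  intro v hv
  simp only [Function.comp_def]
  rw [hperkey v hv]

-- ===== VERDICT (by name: the statement is the Claim_ definition above) =====
theorem ubicadorDeVocales_spec : Claim_equal_ubicadorDeVocales := by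
  intro palabra _
  show ubicadorDeVocales palabra = ubicadorDeVocales_alt palabra
  exact pvMain (PySem.Str.lower palabra).toList
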